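-- pv_equiv track=rewrite | github.com/raman-lab/promoter_prediction | encode_one_hot.py | encode_one_hot
-- ===== SOURCE A (Python) =====
-- import itertools
--
-- def encode_one_hot(sequence_list, length=19, pairwise=True):
--     nucleotides = 'ACGT'
--     positions = range(0, length)
--     single_position_items = list(itertools.product(positions, nucleotides))
--     pairwise_positions = list(itertools.combinations(positions, 2))
--     pairwise_nucleotides = list(itertools.product(nucleotides, nucleotides))
--     pairwise_items = list(itertools.product(pairwise_positions, pairwise_nucleotides))
--     feature_matrix = []
--     for seq in sequence_list:
--         x = [1]
--         for position, nucleotide in single_position_items: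
--             if seq[position] == nucleotide:
--                 x.append(1)
--             else:
--                 x.append(0)
--         if pairwise:
--             for position_pair, nucleotide_pair in pairwise_items:
--                 if seq[position_pair[0]] == nucleotide_pair[0] and seq[position_pair[1]] == nucleotide_pair[1]:
--                     x.append(1)
--                 else:
--                     x.append(0)
--         feature_matrix.append(x)
--     return feature_matrix
-- ===== SOURCE B (Python) =====
-- def encode_one_hot(sequence_list, length=19, pairwise=True):
--     code = {'A': 0, 'C': 1, 'G': 2, 'T': 3}
--     n = length if length > 0 else 0
--     npairs = n * (n - 1) // 2
--     size = 1 + 4 * n + (16 * npairs if pairwise else 0)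
--     base = 1 + 4 * n
--     feature_matrix = []
--     for seq in sequence_list:
--         idxs = [code.get(seq[p], -1) for p in range(n)]
--         x = [0] * size
--         x[0] = 1
--         for p, v in enumerate(idxs):
--             if v >= 0:
--                 x[1 + 4 * p + v] = 1
--         if pairwise:
--             k = 0
--             for p in range(n):
--                 for q in range(p + 1, n):
--                     if idxs[p] >= 0 and idxs[q] >= 0:
--                         x[base + 16 * k + 4 * idxs[p] + idxs[q]] = 1
--                     k += 1
--         feature_matrix.append(x)
--     return feature_matrix
-- ===== Notes on version B (the rewrite author's own statement) =====
-- stated objective: alternative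
-- what changed: B replaces A's one-comparison-per-feature scan over precomputed itertools products by preallocating a zero row of the full feature width and writing 1s only at arithmetically computed hot indices (1+4p+code, base+16k+4i0+i1) from a per-position nucleotide-code table built once.
import Mathlib
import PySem

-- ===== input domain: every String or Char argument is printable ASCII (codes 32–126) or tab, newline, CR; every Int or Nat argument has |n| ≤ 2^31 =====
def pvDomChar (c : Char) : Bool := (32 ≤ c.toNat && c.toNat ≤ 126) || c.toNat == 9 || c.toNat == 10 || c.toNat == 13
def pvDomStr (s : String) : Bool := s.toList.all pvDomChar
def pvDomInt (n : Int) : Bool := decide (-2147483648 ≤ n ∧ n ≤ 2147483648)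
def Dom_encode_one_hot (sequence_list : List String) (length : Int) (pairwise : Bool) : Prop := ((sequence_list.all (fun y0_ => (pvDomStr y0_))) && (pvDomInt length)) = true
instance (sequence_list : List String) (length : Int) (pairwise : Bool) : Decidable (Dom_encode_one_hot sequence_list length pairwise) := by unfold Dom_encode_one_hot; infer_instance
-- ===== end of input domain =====

-- B preallocates one zero vector per sequence and writes 1s at arithmetically computed hot indices,
-- instead of A's one comparison per feature; return value only (A mutates nothing observable).

-- ===== PORT A =====
-- itertools.combinations(l, 2) in order
def pvCombos2 : List Int → List (Int × Int)
  | [] => []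
  | x :: xs => xs.map (fun y => (x, y)) ++ pvCombos2 xs

def pvNucs : List Char := ['A', 'C', 'G', 'T']

def encode_one_hot (sequence_list : List String) (length : Int) (pairwise : Bool) : List (List Int) :=
  let nucleotides := pvNucs
  let positions := PySem.List.pyRange 0 length 1
  let single_position_items := positions.flatMap (fun p => nucleotides.map (fun n => (p, n)))
  let pairwise_positions := pvCombos2 positions
  let pairwise_nucleotides := nucleotides.flatMap (fun a => nucleotides.map (fun b => (a, b)))
  let pairwise_items := pairwise_positions.flatMap (fun pp => pairwise_nucleotides.map (fun nn => (pp, nn)))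
  sequence_list.foldl (fun feature_matrix seq =>
    let x : List Int := [1]
    let x := single_position_items.foldl (fun x pn =>
      if PySem.List.pyGet? seq.toList pn.1 == some pn.2 then x ++ [1] else x ++ [0]) x
    let x := if pairwise then
        pairwise_items.foldl (fun x it =>
          if (PySem.List.pyGet? seq.toList it.1.1 == some it.2.1) &&
             (PySem.List.pyGet? seq.toList it.1.2 == some it.2.2) then x ++ [1] else x ++ [0]) x
      else x
    feature_matrix ++ [x]) []

-- ===== PORT B =====
-- code = {'A':0,'C':1,'G':2,'T':3}
def pvCode : PySem.Dict Char Int :=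
  PySem.Dict.ofList [('A', 0), ('C', 1), ('G', 2), ('T', 3)]

-- B: one zero vector of the full feature width per sequence; hot indices written by arithmetic.
-- Python's item assignment x[i] = 1 is ported as List.set: exact here because every written index
-- is in range whenever the reads seq[p] succeed (i.e. on Pre_).
def encode_one_hot_alt (sequence_list : List String) (length : Int) (pairwise : Bool) : List (List Int) :=
  let code := pvCode
  let n : Int := if length > 0 then length else 0
  let npairs : Int := PySem.Int.floordiv (n * (n - 1)) 2
  let size : Int := 1 + 4 * n + (if pairwise then 16 * npairs else 0)
  let base : Int := 1 + 4 * n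
  sequence_list.foldl (fun feature_matrix seq =>
    let idxs : List Int := (PySem.List.pyRange 0 n 1).map (fun p =>
      (PySem.List.pyGet? seq.toList p).elim (-1) (fun c => code.getD c (-1)))
    let x : List Int := List.replicate size.toNat 0
    let x := x.set 0 1
    let x := (PySem.List.enumerate idxs 0).foldl (fun x pv =>
      if 0 ≤ pv.2 then x.set (1 + 4 * pv.1 + pv.2).toNat 1 else x) x
    let x := if pairwise then
        ((PySem.List.pyRange 0 n 1).foldl (fun (st : List Int × Int) p =>
          (PySem.List.pyRange (p + 1) n 1).foldl (fun (st : List Int × Int) q =>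
            let ip := PySem.List.pyGetD idxs p (-1)
            let iq := PySem.List.pyGetD idxs q (-1)
            let x' := if 0 ≤ ip ∧ 0 ≤ iq then st.1.set (base + 16 * st.2 + 4 * ip + iq).toNat 1 else st.1
            (x', st.2 + 1)) st) (x, 0)).1
      else x
    feature_matrix ++ [x]) []

-- ===== PRECONDITION & SPEC =====
-- Pre_ excludes exactly the inputs on which A raises IndexError: some sequence shorter than `length`.
def Pre_encode_one_hot (sequence_list : List String) (length : Int) (pairwise : Bool) : Prop :=
  ∀ s ∈ sequence_list, length ≤ (s.toList.length : Int)
instance (sequence_list : List String) (length : Int) (pairwise : Bool) : Decidable (Pre_encode_one_hot sequence_list length pairwise) := by unfold Pre_encode_one_hot; infer_instance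

def pvWitness_encode_one_hot : List String × Int × Bool := (["ACX", "TGA"], 3, true)

def Spec_encode_one_hot (sequence_list : List String) (length : Int) (pairwise : Bool) (out : List (List Int)) : Prop := out = encode_one_hot_alt sequence_list length pairwise
instance (sequence_list : List String) (length : Int) (pairwise : Bool) (out : List (List Int)) : Decidable (Spec_encode_one_hot sequence_list length pairwise out) := by unfold Spec_encode_one_hot; infer_instance

-- ===== CLAIM (what is proved, stated in full; the proofs are below) =====
def Claim_equal_encode_one_hot : Prop := ∀ (sequence_list : List String) (length : Int) (pairwise : Bool), Dom_encode_one_hot sequence_list length pairwise → Pre_encode_one_hot sequence_list length pairwise → Spec_encode_one_hot sequence_list length pairwise (encode_one_hot sequence_list length pairwise)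

-- ===== LEMMAS AND PROOFS =====

-- the nucleotide code of a char, as B computes it
def pvCodeOf (c : Char) : Int := pvCode.getD c (-1)

lemma pvCodeOf_spec (c : Char) : pvCodeOf c =
    if c = 'A' then 0 else if c = 'C' then 1 else if c = 'G' then 2 else if c = 'T' then 3 else -1 := by
  have h : pvCode = ((((PySem.Dict.empty).insert 'A' 0).insert 'C' 1).insert 'G' 2).insert 'T' 3 := by
    decide
  unfold pvCodeOf
  rw [h]
  split_ifs with h1 h2 h3 h4
  · subst h1; decide
  · subst h2; decide
  · subst h3; decide
  · subst h4; decide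
  · simp [PySem.Dict.getD_insert, h1, h2, h3, h4, PySem.Dict.getD_empty]

lemma pvCodeOf_range (c : Char) : -1 ≤ pvCodeOf c ∧ pvCodeOf c ≤ 3 := by
  rw [pvCodeOf_spec]; split_ifs <;> norm_num

-- B's 4-wide block for a position
def pvBl4 (v : Int) : List Int :=
  if 0 ≤ v then (List.replicate 4 (0 : Int)).set v.toNat 1 else List.replicate 4 0

-- B's 16-wide block for a position pair
def pvBl16 (v w : Int) : List Int :=
  if 0 ≤ v ∧ 0 ≤ w then (List.replicate 16 (0 : Int)).set (4 * v + w).toNat 1 else List.replicate 16 0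

@[simp] lemma length_pvBl4 (v : Int) : (pvBl4 v).length = 4 := by
  unfold pvBl4; split_ifs <;> simp

@[simp] lemma length_pvBl16 (v w : Int) : (pvBl16 v w).length = 16 := by
  unfold pvBl16; split_ifs <;> simp

lemma blockA4 (c : Char) :
    pvNucs.map (fun nu => if (c == nu) = true then (1 : Int) else 0) = pvBl4 (pvCodeOf c) := by
  rw [pvCodeOf_spec]
  by_cases h1 : c = 'A'
  · subst h1; decide
  by_cases h2 : c = 'C'
  · subst h2; decide
  by_cases h3 : c = 'G'
  · subst h3; decide
  by_cases h4 : c = 'T'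
  · subst h4; decide
  simp [pvNucs, pvBl4, h1, h2, h3, h4]

lemma blockA16 (c0 c1 : Char) :
    (pvNucs.flatMap (fun a => pvNucs.map (fun b => (a, b)))).map
      (fun nn => if ((c0 == nn.1) && (c1 == nn.2)) = true then (1 : Int) else 0)
    = pvBl16 (pvCodeOf c0) (pvCodeOf c1) := by
  rw [pvCodeOf_spec c0, pvCodeOf_spec c1]
  by_cases a1 : c0 = 'A'
  · subst a1
    by_cases b1 : c1 = 'A'
    · subst b1; decide
    by_cases b2 : c1 = 'C'
    · subst b2; decide
    by_cases b3 : c1 = 'G'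
    · subst b3; decide
    by_cases b4 : c1 = 'T'
    · subst b4; decide
    simp [pvNucs, pvBl16, b1, b2, b3, b4]
  by_cases a2 : c0 = 'C'
  · subst a2
    by_cases b1 : c1 = 'A'
    · subst b1; decide
    by_cases b2 : c1 = 'C'
    · subst b2; decide
    by_cases b3 : c1 = 'G'
    · subst b3; decide
    by_cases b4 : c1 = 'T'
    · subst b4; decide
    simp [pvNucs, pvBl16, b1, b2, b3, b4, a1]
  by_cases a3 : c0 = 'G'
  · subst a3
    by_cases b1 : c1 = 'A'
    · subst b1; decide
    by_cases b2 : c1 = 'C'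
    · subst b2; decide
    by_cases b3 : c1 = 'G'
    · subst b3; decide
    by_cases b4 : c1 = 'T'
    · subst b4; decide
    simp [pvNucs, pvBl16, b1, b2, b3, b4, a1, a2]
  by_cases a4 : c0 = 'T'
  · subst a4
    by_cases b1 : c1 = 'A'
    · subst b1; decide
    by_cases b2 : c1 = 'C'
    · subst b2; decide
    by_cases b3 : c1 = 'G'
    · subst b3; decide
    by_cases b4 : c1 = 'T'
    · subst b4; decide
    simp [pvNucs, pvBl16, b1, b2, b3, b4, a1, a2, a3]
  simp [pvNucs, pvBl16, a1, a2, a3, a4]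

-- writing inside the middle segment of a concatenation
lemma set_mid (d m z : List Int) (j : ℕ) (v : Int) (hj : j < m.length) :
    (d ++ m ++ z).set (d.length + j) v = d ++ m.set j v ++ z := by
  rw [List.append_assoc, List.set_append_right _ _ (by omega),
    show d.length + j - d.length = j by omega, List.set_append_left _ _ hj, List.append_assoc]

-- generic: a fold over (enumerate vs k) that writes one block of width B per element
lemma foldl_blocks_enum (B c : ℕ) (step : List Int → (Int × Int) → List Int) (bl : Int → List Int) :
    ∀ (vs : List Int) (d z : List Int) (k : ℕ),
      (∀ v ∈ vs, (bl v).length = B) →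
      (∀ (d' z' : List Int) (k' : ℕ) (v : Int), v ∈ vs → d'.length = c + B * k' →
        step (d' ++ List.replicate B 0 ++ z') ((k' : Int), v) = d' ++ bl v ++ z') →
      d.length = c + B * k →
      (PySem.List.enumerate vs (k : Int)).foldl step (d ++ List.replicate (B * vs.length) 0 ++ z)
        = d ++ vs.flatMap bl ++ z := by
  intro vs
  induction vs with
  | nil => intro d z k _ _ hd; simp [PySem.List.enumerate_nil]
  | cons v vs ih =>
    intro d z k hlen hstep hd
    rw [PySem.List.enumerate_cons, List.foldl_cons]
    have hrep : List.replicate (B * (v :: vs).length) (0 : Int)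
        = List.replicate B 0 ++ List.replicate (B * vs.length) 0 := by
      rw [List.replicate_append_replicate]
      congr 1
      simp [List.length_cons, Nat.mul_succ, Nat.add_comm]
    rw [hrep, show d ++ (List.replicate B 0 ++ List.replicate (B * vs.length) 0) ++ z
        = d ++ List.replicate B 0 ++ (List.replicate (B * vs.length) 0 ++ z) by
          simp only [List.append_assoc],
      hstep d _ k v (by simp) hd]
    have hk : ((k : Int) + 1) = ((k + 1 : ℕ) : Int) := by push_cast; ring
    rw [hk, show d ++ bl v ++ (List.replicate (B * vs.length) 0 ++ z)
        = (d ++ bl v) ++ List.replicate (B * vs.length) 0 ++ z by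
          simp only [List.append_assoc],
      ih (d ++ bl v) z (k + 1) (fun v' hv' => hlen v' (by simp [hv']))
        (fun d' z' k' v' hv' => hstep d' z' k' v' (by simp [hv']))
        (by rw [List.length_append, hlen v (by simp), hd, Nat.mul_succ]; ring)]
    simp only [List.flatMap_cons, List.append_assoc]

-- generic: a fold carrying (vector, counter) that writes one block of width B per element
lemma foldl_blocks_ctr {α : Type} (B c : ℕ) (step : List Int × Int → α → List Int × Int)
    (bl : α → List Int) :
    ∀ (l : List α) (d z : List Int) (k : ℕ),
      (∀ a ∈ l, (bl a).length = B) →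
      (∀ (d' z' : List Int) (k' : ℕ) (a : α), a ∈ l → d'.length = c + B * k' →
        step (d' ++ List.replicate B 0 ++ z', (k' : Int)) a = (d' ++ bl a ++ z', (k' : Int) + 1)) →
      d.length = c + B * k →
      (l.foldl step (d ++ List.replicate (B * l.length) 0 ++ z, (k : Int))).1
        = d ++ l.flatMap bl ++ z := by
  intro l
  induction l with
  | nil => intro d z k _ _ hd; simp
  | cons a l ih =>
    intro d z k hlen hstep hd
    rw [List.foldl_cons]
    have hrep : List.replicate (B * (a :: l).length) (0 : Int)
        = List.replicate B 0 ++ List.replicate (B * l.length) 0 := by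
      rw [List.replicate_append_replicate]
      congr 1
      simp [List.length_cons, Nat.mul_succ, Nat.add_comm]
    rw [hrep, show d ++ (List.replicate B 0 ++ List.replicate (B * l.length) 0) ++ z
        = d ++ List.replicate B 0 ++ (List.replicate (B * l.length) 0 ++ z) by
          simp only [List.append_assoc],
      hstep d _ k a (by simp) hd]
    have hk : ((k : Int) + 1) = ((k + 1 : ℕ) : Int) := by push_cast; ring
    rw [hk, show d ++ bl a ++ (List.replicate (B * l.length) 0 ++ z)
        = (d ++ bl a) ++ List.replicate (B * l.length) 0 ++ z by
          simp only [List.append_assoc],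
      ih (d ++ bl a) z (k + 1) (fun a' ha' => hlen a' (by simp [ha']))
        (fun d' z' k' a' ha' => hstep d' z' k' a' (by simp [ha']))
        (by rw [List.length_append, hlen a (by simp), hd, Nat.mul_succ]; ring)]
    simp only [List.flatMap_cons, List.append_assoc]

-- nested fold = fold over the flatMap of pairs
lemma foldl_flatMap {α β σ : Type} (l : List α) (g : α → List β) (f : σ → β → σ) (init : σ) :
    (l.flatMap g).foldl f init = l.foldl (fun acc a => (g a).foldl f acc) init := by
  induction l generalizing init with
  | nil => simp
  | cons a l ih => simp [List.foldl_append, ih]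

-- combinations of a range, as B's nested loops enumerate them
lemma combos_range (n : Int) : ∀ (a : Int),
    pvCombos2 (PySem.List.pyRange a n 1)
      = (PySem.List.pyRange a n 1).flatMap (fun p => (PySem.List.pyRange (p + 1) n 1).map (fun q => (p, q))) := by
  suffices H : ∀ (k : ℕ) (a : Int), (n - a).toNat = k →
      pvCombos2 (PySem.List.pyRange a n 1)
        = (PySem.List.pyRange a n 1).flatMap (fun p => (PySem.List.pyRange (p + 1) n 1).map (fun q => (p, q))) by
    intro a; exact H _ a rfl
  intro k
  induction k with
  | zero =>
    intro a h
    rw [PySem.List.pyRange_one_eq_nil (by omega)]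
    simp [pvCombos2]
  | succ k ih =>
    intro a h
    rw [PySem.List.pyRange_one_cons (by omega)]
    simp only [pvCombos2, List.flatMap_cons]
    rw [ih (a + 1) (by omega)]

lemma length_combos (l : List Int) : (pvCombos2 l).length = l.length * (l.length - 1) / 2 := by
  induction l with
  | nil => simp [pvCombos2]
  | cons x xs ih =>
    simp only [pvCombos2, List.length_append, List.length_map, ih, List.length_cons]
    generalize xs.length = L
    have h2 : (L + 1) * (L + 1 - 1) = L * (L - 1) + 2 * L := by
      cases L <;> simp [Nat.succ_sub_one] <;> ring
    rw [h2, Nat.add_mul_div_left _ _ (by norm_num : 0 < 2)]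
    omega

lemma mem_pvCombos2 {l : List Int} {p : Int × Int} (h : p ∈ pvCombos2 l) : p.1 ∈ l ∧ p.2 ∈ l := by
  induction l with
  | nil => simp [pvCombos2] at h
  | cons x xs ih =>
    simp only [pvCombos2, List.mem_append, List.mem_map] at h
    rcases h with ⟨y, hy, rfl⟩ | h
    · exact ⟨List.mem_cons_self, List.mem_cons_of_mem _ hy⟩
    · rcases ih h with ⟨h1, h2⟩
      exact ⟨List.mem_cons_of_mem _ h1, List.mem_cons_of_mem _ h2⟩

lemma some_beq_some (a b : Char) : (some a == some b) = (a == b) := by simp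

-- per-sequence equality: A's comparison-built row equals B's zero-vector-with-writes row
lemma per_seq (N : ℕ) (pw : Bool) (cs : List Char) (hNl : (N : Int) ≤ (cs.length : Int)) :
    (if pw = true then
        ((pvCombos2 (PySem.List.pyRange 0 (N:Int) 1)).flatMap (fun pp => (pvNucs.flatMap (fun a => pvNucs.map (fun b => (a, b)))).map (fun nn => (pp, nn)))).foldl
          (fun x it =>
            if (PySem.List.pyGet? cs it.1.1 == some it.2.1) && (PySem.List.pyGet? cs it.1.2 == some it.2.2) then x ++ [1] else x ++ [0])
          (((PySem.List.pyRange 0 (N:Int) 1).flatMap (fun p => pvNucs.map (fun n => (p, n)))).foldl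
            (fun x pn => if PySem.List.pyGet? cs pn.1 == some pn.2 then x ++ [1] else x ++ [0]) [1])
      else
        ((PySem.List.pyRange 0 (N:Int) 1).flatMap (fun p => pvNucs.map (fun n => (p, n)))).foldl
          (fun x pn => if PySem.List.pyGet? cs pn.1 == some pn.2 then x ++ [1] else x ++ [0]) [1])
    =
    (let idxs : List Int := (PySem.List.pyRange 0 (N:Int) 1).map (fun p =>
        (PySem.List.pyGet? cs p).elim (-1) (fun c => pvCode.getD c (-1)))
     let x : List Int := List.replicate ((1 + 4 * (N:Int) + (if pw = true then 16 * PySem.Int.floordiv ((N:Int) * ((N:Int) - 1)) 2 else 0)).toNat) 0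
     let x := x.set 0 1
     let x := (PySem.List.enumerate idxs 0).foldl (fun x pv =>
       if 0 ≤ pv.2 then x.set (1 + 4 * pv.1 + pv.2).toNat 1 else x) x
     if pw = true then
        ((PySem.List.pyRange 0 (N:Int) 1).foldl (fun (st : List Int × Int) p =>
          (PySem.List.pyRange (p + 1) (N:Int) 1).foldl (fun (st : List Int × Int) q =>
            let ip := PySem.List.pyGetD idxs p (-1)
            let iq := PySem.List.pyGetD idxs q (-1)
            let x' := if 0 ≤ ip ∧ 0 ≤ iq then st.1.set ((1 + 4 * (N:Int)) + 16 * st.2 + 4 * ip + iq).toNat 1 else st.1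
            (x', st.2 + 1)) st) (x, 0)).1
      else x) := by
  dsimp only
  set f : Int → Int := fun p => (PySem.List.pyGet? cs p).elim (-1) (fun c => pvCode.getD c (-1)) with hf
  set idxs := (PySem.List.pyRange 0 (N:Int) 1).map f with hidxs
  have hidx : idxs.length = N := by
    simp [hidxs, PySem.List.length_pyRange_one]
  have hfrange : ∀ p : Int, -1 ≤ f p ∧ f p ≤ 3 := by
    intro p
    rw [hf]
    cases h : PySem.List.pyGet? cs p with
    | none => simp [h]
    | some c => simp only [h, Option.elim]; simpa [pvCodeOf] using pvCodeOf_range c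
  have hget : ∀ p : Int, 0 ≤ p → p < (N:Int) → PySem.List.pyGet? cs p = some (cs.getD p.toNat 'A') := by
    intro p h0 h1
    rw [PySem.List.pyGet?_eq_some_getElem cs h0 (by omega), List.getD_eq_getElem cs 'A' (by omega)]
  have hfc : ∀ p : Int, 0 ≤ p → p < (N:Int) → f p = pvCodeOf (cs.getD p.toNat 'A') := by
    intro p h0 h1
    rw [hf]
    dsimp only
    rw [hget p h0 h1]
    rfl
  have hA1 : (fun (x : List Int) (pn : Int × Char) =>
        if (PySem.List.pyGet? cs pn.1 == some pn.2) = true then x ++ [(1:Int)] else x ++ [0])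
      = fun x pn => x ++ [if (PySem.List.pyGet? cs pn.1 == some pn.2) = true then (1:Int) else 0] := by
    funext x pn
    by_cases h : (PySem.List.pyGet? cs pn.1 == some pn.2) = true <;> simp [h]
  have hA2 : (fun (x : List Int) (it : (Int × Int) × Char × Char) =>
        if ((PySem.List.pyGet? cs it.1.1 == some it.2.1) && (PySem.List.pyGet? cs it.1.2 == some it.2.2)) = true then x ++ [(1:Int)] else x ++ [0])
      = fun x it => x ++ [if ((PySem.List.pyGet? cs it.1.1 == some it.2.1) && (PySem.List.pyGet? cs it.1.2 == some it.2.2)) = true then (1:Int) else 0] := by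
    funext x it
    by_cases h : ((PySem.List.pyGet? cs it.1.1 == some it.2.1) && (PySem.List.pyGet? cs it.1.2 == some it.2.2)) = true <;> simp [h]
  have hsingle : ((PySem.List.pyRange 0 (N:Int) 1).flatMap (fun p => pvNucs.map (fun n => (p, n)))).map
        (fun pn => if (PySem.List.pyGet? cs pn.1 == some pn.2) = true then (1:Int) else 0)
      = idxs.flatMap pvBl4 := by
    rw [hidxs, List.flatMap_map, List.map_flatMap]
    apply List.flatMap_congr
    intro p hp
    obtain ⟨h0, h1⟩ := PySem.List.mem_pyRange_one.mp hp
    rw [List.map_map, hfc p h0 h1, ← blockA4 (cs.getD p.toNat 'A')]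
    apply List.map_congr_left
    intro nu _
    simp only [Function.comp_apply]
    rw [hget p h0 h1, some_beq_some]
  have hpairR : ((pvCombos2 (PySem.List.pyRange 0 (N:Int) 1)).flatMap
        (fun pp => (pvNucs.flatMap (fun a => pvNucs.map (fun b => (a, b)))).map (fun nn => (pp, nn)))).map
        (fun it => if ((PySem.List.pyGet? cs it.1.1 == some it.2.1) && (PySem.List.pyGet? cs it.1.2 == some it.2.2)) = true then (1:Int) else 0)
      = (pvCombos2 (PySem.List.pyRange 0 (N:Int) 1)).flatMap (fun pq => pvBl16 (f pq.1) (f pq.2)) := by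
    rw [List.map_flatMap]
    apply List.flatMap_congr
    intro pq hpq
    obtain ⟨hp1, hp2⟩ := mem_pvCombos2 hpq
    obtain ⟨h10, h11⟩ := PySem.List.mem_pyRange_one.mp hp1
    obtain ⟨h20, h21⟩ := PySem.List.mem_pyRange_one.mp hp2
    rw [List.map_map, hfc pq.1 h10 h11, hfc pq.2 h20 h21,
      ← blockA16 (cs.getD pq.1.toNat 'A') (cs.getD pq.2.toNat 'A')]
    apply List.map_congr_left
    intro nn _
    simp only [Function.comp_apply]
    rw [hget pq.1 h10 h11, hget pq.2 h20 h21, some_beq_some, some_beq_some]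
  have hstepE : ∀ (d' z' : List Int) (k' : ℕ) (v : Int), v ∈ idxs → d'.length = 1 + 4 * k' →
      (fun (x : List Int) (pv : Int × Int) => if 0 ≤ pv.2 then x.set (1 + 4 * pv.1 + pv.2).toNat 1 else x)
        (d' ++ List.replicate 4 0 ++ z') ((k' : Int), v) = d' ++ pvBl4 v ++ z' := by
    intro d' z' k' v hv hd'
    rw [hidxs] at hv
    obtain ⟨p, hp, rfl⟩ := List.mem_map.mp hv
    have hb := hfrange p
    dsimp only
    by_cases h0 : 0 ≤ f p
    · rw [if_pos h0]
      have hidxeq : (1 + 4 * ((k' : ℕ) : Int) + f p).toNat = d'.length + (f p).toNat := by omega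
      rw [hidxeq, set_mid _ _ _ _ _ (by simp; omega)]
      simp only [pvBl4, if_pos h0]
    · rw [if_neg h0]
      simp only [pvBl4, if_neg h0]
  cases pw with
  | false =>
    simp only [Bool.false_eq_true, if_false]
    rw [hA1, PySem.List.foldl_append_singleton_eq_map]
    have hinit : (List.replicate ((1:Int) + 4 * (N:Int) + 0).toNat (0:Int)).set 0 1
        = [1] ++ List.replicate (4 * N) 0 ++ [] := by
      rw [show ((1:Int) + 4 * (N:Int) + 0).toNat = 4 * N + 1 by omega, List.replicate_succ]
      simp [List.set_cons_zero]
    have HE := foldl_blocks_enum 4 1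
      (fun (x : List Int) (pv : Int × Int) => if 0 ≤ pv.2 then x.set (1 + 4 * pv.1 + pv.2).toNat 1 else x)
      pvBl4 idxs [1] [] 0 (fun v _ => length_pvBl4 v) hstepE (by simp)
    simp only [Nat.cast_zero, hidx] at HE
    rw [hinit, HE, hsingle]
    simp
  | true =>
    simp only [if_true]
    rw [hA1, PySem.List.foldl_append_singleton_eq_map, hA2, PySem.List.foldl_append_singleton_eq_map]
    have hnp : PySem.Int.floordiv ((N:Int) * ((N:Int) - 1)) 2 = ((N * (N - 1) / 2 : ℕ) : Int) := by
      have hcast : ((N:Int) * ((N:Int) - 1)) = ((N * (N - 1) : ℕ) : Int) := by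
        cases N with
        | zero => simp
        | succ n => push_cast [Nat.succ_sub_one]; ring
      rw [hcast]
      exact_mod_cast PySem.Int.floordiv_natCast (N * (N - 1)) 2
    have hinit : (List.replicate ((1:Int) + 4 * (N:Int) + 16 * PySem.Int.floordiv ((N:Int) * ((N:Int) - 1)) 2).toNat (0:Int)).set 0 1
        = [1] ++ List.replicate (4 * N) 0 ++ List.replicate (16 * (N * (N - 1) / 2)) 0 := by
      rw [hnp]
      generalize (N * (N - 1) / 2) = m
      rw [show ((1:Int) + 4 * (N:Int) + 16 * ((m : ℕ) : Int)).toNat = (4 * N + 16 * m) + 1 by omega,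
        List.replicate_succ]
      simp [List.set_cons_zero, List.append_assoc, List.replicate_append_replicate]
    have HE := foldl_blocks_enum 4 1
      (fun (x : List Int) (pv : Int × Int) => if 0 ≤ pv.2 then x.set (1 + 4 * pv.1 + pv.2).toNat 1 else x)
      pvBl4 idxs [1] (List.replicate (16 * (N * (N - 1) / 2)) 0) 0 (fun v _ => length_pvBl4 v) hstepE (by simp)
    simp only [Nat.cast_zero, hidx] at HE
    rw [hinit, HE]
    have hcomb := combos_range (N:Int) 0
    have hnest : ∀ (init : List Int × Int),
        (PySem.List.pyRange 0 (N:Int) 1).foldl (fun (st : List Int × Int) p =>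
          (PySem.List.pyRange (p + 1) (N:Int) 1).foldl (fun (st : List Int × Int) q =>
            (if 0 ≤ PySem.List.pyGetD idxs p (-1) ∧ 0 ≤ PySem.List.pyGetD idxs q (-1) then
                st.1.set ((1 + 4 * (N:Int)) + 16 * st.2 + 4 * PySem.List.pyGetD idxs p (-1) + PySem.List.pyGetD idxs q (-1)).toNat 1
              else st.1, st.2 + 1)) st) init
        = (pvCombos2 (PySem.List.pyRange 0 (N:Int) 1)).foldl (fun (st : List Int × Int) (pq : Int × Int) =>
            (if 0 ≤ PySem.List.pyGetD idxs pq.1 (-1) ∧ 0 ≤ PySem.List.pyGetD idxs pq.2 (-1) then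
                st.1.set ((1 + 4 * (N:Int)) + 16 * st.2 + 4 * PySem.List.pyGetD idxs pq.1 (-1) + PySem.List.pyGetD idxs pq.2 (-1)).toNat 1
              else st.1, st.2 + 1)) init := by
      intro init
      rw [hcomb, foldl_flatMap]
      simp only [List.foldl_map]
    have hstepP : ∀ (d' z' : List Int) (k' : ℕ) (pq : Int × Int), pq ∈ pvCombos2 (PySem.List.pyRange 0 (N:Int) 1) →
        d'.length = (1 + 4 * N) + 16 * k' →
        (fun (st : List Int × Int) (pq : Int × Int) =>
            (if 0 ≤ PySem.List.pyGetD idxs pq.1 (-1) ∧ 0 ≤ PySem.List.pyGetD idxs pq.2 (-1) then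
                st.1.set ((1 + 4 * (N:Int)) + 16 * st.2 + 4 * PySem.List.pyGetD idxs pq.1 (-1) + PySem.List.pyGetD idxs pq.2 (-1)).toNat 1
              else st.1, st.2 + 1))
          (d' ++ List.replicate 16 0 ++ z', (k' : Int)) pq
        = (d' ++ pvBl16 (f pq.1) (f pq.2) ++ z', (k' : Int) + 1) := by
      intro d' z' k' pq hpq hd'
      obtain ⟨hp1, hp2⟩ := mem_pvCombos2 hpq
      obtain ⟨h10, h11⟩ := PySem.List.mem_pyRange_one.mp hp1
      obtain ⟨h20, h21⟩ := PySem.List.mem_pyRange_one.mp hp2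
      have e1 : PySem.List.pyGetD idxs pq.1 (-1) = f pq.1 := by
        rw [hidxs]; exact PySem.List.pyGetD_map_pyRange_of_nonneg f _ _ _ h10 h11
      have e2 : PySem.List.pyGetD idxs pq.2 (-1) = f pq.2 := by
        rw [hidxs]; exact PySem.List.pyGetD_map_pyRange_of_nonneg f _ _ _ h20 h21
      dsimp only
      rw [e1, e2]
      have hb1 := hfrange pq.1
      have hb2 := hfrange pq.2
      by_cases hc : 0 ≤ f pq.1 ∧ 0 ≤ f pq.2
      · rw [if_pos hc]
        have hix : ((1 + 4 * (N:Int)) + 16 * ((k' : ℕ) : Int) + 4 * f pq.1 + f pq.2).toNat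
            = d'.length + (4 * f pq.1 + f pq.2).toNat := by omega
        rw [hix, set_mid _ _ _ _ _ (by simp; omega)]
        simp only [pvBl16, if_pos hc]
      · rw [if_neg hc]
        simp only [pvBl16, if_neg hc]
    have hflat : ([1] ++ idxs.flatMap pvBl4).length = (1 + 4 * N) + 16 * 0 := by
      simp [List.length_flatMap, List.map_const', List.sum_replicate, hidx]
      ring
    have hcl : (pvCombos2 (PySem.List.pyRange 0 (N:Int) 1)).length = N * (N - 1) / 2 := by
      rw [length_combos]
      simp [PySem.List.length_pyRange_one]
    have HP := foldl_blocks_ctr 16 (1 + 4 * N)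
      (fun (st : List Int × Int) (pq : Int × Int) =>
        (if 0 ≤ PySem.List.pyGetD idxs pq.1 (-1) ∧ 0 ≤ PySem.List.pyGetD idxs pq.2 (-1) then
            st.1.set ((1 + 4 * (N:Int)) + 16 * st.2 + 4 * PySem.List.pyGetD idxs pq.1 (-1) + PySem.List.pyGetD idxs pq.2 (-1)).toNat 1
          else st.1, st.2 + 1))
      (fun pq => pvBl16 (f pq.1) (f pq.2))
      (pvCombos2 (PySem.List.pyRange 0 (N:Int) 1)) ([1] ++ idxs.flatMap pvBl4) [] 0
      (fun a _ => length_pvBl16 _ _) hstepP hflat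
    simp only [Nat.cast_zero, hcl, List.append_nil] at HP
    rw [hnest, HP, hsingle, hpairR]

-- ===== VERDICT (by name: the statement is the Claim_ definition above) =====
theorem encode_one_hot_spec : Claim_equal_encode_one_hot := by
  intro seqs length pairwise _hdom hpre
  unfold Spec_encode_one_hot encode_one_hot encode_one_hot_alt
  dsimp only
  rw [PySem.List.foldl_append_singleton_eq_map, PySem.List.foldl_append_singleton_eq_map,
    List.nil_append, List.nil_append]
  apply List.map_congr_left
  intro seq hseq
  have hlen := hpre seq hseq
  have hnn : (if length > 0 then length else 0) = ((length.toNat : ℕ) : Int) := by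
    split_ifs <;> omega
  have hpos : PySem.List.pyRange 0 length 1 = PySem.List.pyRange 0 ((length.toNat : ℕ) : Int) 1 := by
    by_cases h : 0 < length
    · congr 1; omega
    · rw [PySem.List.pyRange_one_eq_nil (by omega), PySem.List.pyRange_one_eq_nil (by omega)]
  rw [hnn, hpos]
  exact per_seq length.toNat pairwise seq.toList (by omega)
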